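-- pv_equiv track=rewrite | github.com/yu-xingchen/A-MBER | question_phase_planning.py | _normalize_count_distribution
-- ===== SOURCE A (Python) =====
-- from typing import Any, Dict, List
--
-- def _normalize_count_distribution(target_total: int, counts: Dict[str, int], priority_order: List[str]) -> Dict[str, int]:
--     normalized = {key: max(0, int(value)) for key, value in counts.items()}
--     current_total = sum(normalized.values())
--     if current_total == target_total:
--         return normalized
--     if current_total < target_total:
--         remaining = target_total - current_total
--         order = priority_order or list(normalized.keys())
--         index = 0
--         while remaining > 0 and order:
--             key = order[index % len(order)]
--             normalized[key] = normalized.get(key, 0) + 1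
--             remaining -= 1
--             index += 1
--         return normalized
--
--     overflow = current_total - target_total
--     order = list(reversed(priority_order or list(normalized.keys())))
--     index = 0
--     while overflow > 0 and order:
--         key = order[index % len(order)]
--         if normalized.get(key, 0) > 0:
--             normalized[key] -= 1
--             overflow -= 1
--         index += 1
--     return normalized
-- ===== SOURCE B (Python) =====
-- def _normalize_count_distribution(target_total, counts, priority_order):
--     normalized = {key: max(0, int(value)) for key, value in counts.items()}
--     current_total = sum(normalized.values())
--     if current_total == target_total:
--         return normalized
--     order = priority_order or list(normalized.keys())
--     if not order:
--         return normalized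
--     if current_total < target_total:
--         # closed form: position i of order receives q raises plus one more for i < r
--         remaining = target_total - current_total
--         q, r = divmod(remaining, len(order))
--         for i, key in enumerate(order):
--             inc = q + (1 if i < r else 0)
--             if inc > 0:
--                 normalized[key] = normalized.get(key, 0) + inc
--         return normalized
--     # shrink: apply whole round-robin cycles as one batch per iteration
--     overflow = current_total - target_total
--     rorder = order[::-1]
--     mult = {}
--     for key in rorder:
--         mult[key] = mult.get(key, 0) + 1
--     while True:
--         step = sum(min(normalized.get(key, 0), m) for key, m in mult.items())
--         if step <= 0 or overflow < step:
--             break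
--         for key, m in mult.items():
--             v = normalized.get(key, 0)
--             if v > 0:
--                 normalized[key] = max(0, v - m)
--         overflow -= step
--     for key in rorder:
--         if overflow <= 0:
--             break
--         if normalized.get(key, 0) > 0:
--             normalized[key] -= 1
--             overflow -= 1
--     return normalized
-- ===== Notes on version B (the rewrite author's own statement) =====
-- stated objective: alternative
-- what changed: B replaces A's one-unit-per-iteration modular round-robin loops: the grow branch becomes a single closed-form pass giving each position quotient/remainder increments, and the shrink branch applies whole round-robin cycles as arithmetic batch updates over a precomputed multiplicity table instead of unit steps.
-- outside the precondition, e.g. on _normalize_count_distribution(0, {'b': 5}, ['a']): A does not finish within the time limit, B returns {'b': 5}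
import Mathlib
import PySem

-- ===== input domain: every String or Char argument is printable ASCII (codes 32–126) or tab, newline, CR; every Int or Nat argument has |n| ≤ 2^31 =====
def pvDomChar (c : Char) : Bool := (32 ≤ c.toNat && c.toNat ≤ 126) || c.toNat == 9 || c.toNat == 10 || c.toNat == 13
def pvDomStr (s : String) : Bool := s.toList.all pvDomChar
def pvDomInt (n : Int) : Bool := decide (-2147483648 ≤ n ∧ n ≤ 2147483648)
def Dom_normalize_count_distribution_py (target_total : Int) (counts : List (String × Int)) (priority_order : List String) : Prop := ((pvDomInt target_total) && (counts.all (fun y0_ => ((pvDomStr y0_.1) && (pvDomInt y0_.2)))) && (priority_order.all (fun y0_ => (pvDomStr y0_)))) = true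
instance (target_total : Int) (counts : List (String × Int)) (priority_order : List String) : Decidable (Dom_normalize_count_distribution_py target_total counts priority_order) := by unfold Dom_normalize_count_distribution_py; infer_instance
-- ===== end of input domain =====

-- B replaces A's one-unit-per-iteration round-robin loops by a closed-form single pass (grow)
-- and by whole-cycle batch updates over a multiplicity table (shrink); objective: alternative.

-- ===== PORT A =====
-- dict comprehension {k: max(0, int(v)) …} over the input dict
def pvClampA (counts : List (String × Int)) : PySem.Dict String Int :=
  counts.foldl (fun d p => d.insert p.1 (max 0 p.2)) PySem.Dict.empty

-- one sweep of the modular index over `order` (index % len enumerates order cyclically);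
-- each visited position adds 1 while remaining > 0
def pvIncCycleA (order : List String) (st : PySem.Dict String Int × Int) : PySem.Dict String Int × Int :=
  order.foldl (fun st k =>
    if st.2 > 0 then (st.1.insert k (st.1.getD k 0 + 1), st.2 - 1) else st) st

-- `while remaining > 0 and order:` — fueled (remaining decreases every visited position)
def pvIncLoopA : Nat → List String → PySem.Dict String Int × Int → PySem.Dict String Int × Int
  | 0, _, st => st
  | f + 1, order, st => if st.2 ≤ 0 then st else pvIncLoopA f order (pvIncCycleA order st)

-- one sweep of the modular index over the reversed order; decrement only positive entries
def pvDecCycleA (order : List String) (st : PySem.Dict String Int × Int) : PySem.Dict String Int × Int :=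
  order.foldl (fun st k =>
    if st.2 > 0 then
      if st.1.getD k 0 > 0 then (st.1.insert k (st.1.getD k 0 - 1), st.2 - 1) else st
    else st) st

-- `while overflow > 0 and order:` — fueled; under Pre_ the fuel is never exhausted
def pvDecLoopA : Nat → List String → PySem.Dict String Int × Int → PySem.Dict String Int × Int
  | 0, _, st => st
  | f + 1, order, st => if st.2 ≤ 0 then st else pvDecLoopA f order (pvDecCycleA order st)

def normalize_count_distribution_py (target_total : Int) (counts : List (String × Int)) (priority_order : List String) : List (String × Int) :=
  let normalized := pvClampA counts
  let current_total := normalized.values.sum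
  if current_total = target_total then normalized.items
  else if current_total < target_total then
    let order := if priority_order = [] then normalized.keys else priority_order
    if order = [] then normalized.items
    else (pvIncLoopA ((target_total - current_total).toNat + 1) order
            (normalized, target_total - current_total)).1.items
  else
    let order := (if priority_order = [] then normalized.keys else priority_order).reverse
    if order = [] then normalized.items
    else (pvDecLoopA ((current_total - target_total).toNat + 1) order
            (normalized, current_total - target_total)).1.items

-- ===== PORT B =====
def pvClampB (counts : List (String × Int)) : PySem.Dict String Int :=
  counts.foldl (fun d p => d.insert p.1 (max 0 p.2)) PySem.Dict.empty

-- `for i, key in enumerate(order): inc = q + (1 if i < r else 0); if inc > 0: …` (i carried)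
def pvIncOnceB (q r : Int) : Int → List String → PySem.Dict String Int → PySem.Dict String Int
  | _, [], d => d
  | i, k :: tl, d =>
    let inc := q + (if i < r then 1 else 0)
    pvIncOnceB q r (i + 1) tl (if inc > 0 then d.insert k (d.getD k 0 + inc) else d)

-- `mult[key] = mult.get(key, 0) + 1` over rorder
def pvMultB (rorder : List String) : PySem.Dict String Int :=
  rorder.foldl (fun m k => m.insert k (m.getD k 0 + 1)) PySem.Dict.empty

-- `step = sum(min(normalized.get(key, 0), m) for key, m in mult.items())`
def pvStepB (d : PySem.Dict String Int) (mult : PySem.Dict String Int) : Int :=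
  (mult.items.map (fun km => min (d.getD km.1 0) km.2)).sum

-- `for key, m in mult.items(): v = …get(key, 0); if v > 0: normalized[key] = max(0, v - m)`
def pvBatchB (d : PySem.Dict String Int) (mult : PySem.Dict String Int) : PySem.Dict String Int :=
  mult.items.foldl (fun d km =>
    if d.getD km.1 0 > 0 then d.insert km.1 (max 0 (d.getD km.1 0 - km.2)) else d) d

-- `while True: … break` — fueled; overflow drops by step ≥ 1 each kept iteration
def pvShrinkLoopB : Nat → PySem.Dict String Int → PySem.Dict String Int × Int → PySem.Dict String Int × Int
  | 0, _, st => st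
  | f + 1, mult, st =>
    let step := pvStepB st.1 mult
    if step ≤ 0 ∨ st.2 < step then st
    else pvShrinkLoopB f mult (pvBatchB st.1 mult, st.2 - step)

-- the trailing partial pass (`for key in rorder: if overflow <= 0: break; …`)
def pvFinalPassB (rorder : List String) (st : PySem.Dict String Int × Int) : PySem.Dict String Int × Int :=
  rorder.foldl (fun st k =>
    if st.2 ≤ 0 then st
    else if st.1.getD k 0 > 0 then (st.1.insert k (st.1.getD k 0 - 1), st.2 - 1) else st) st

def normalize_count_distribution_py_alt (target_total : Int) (counts : List (String × Int)) (priority_order : List String) : List (String × Int) :=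
  let normalized := pvClampB counts
  let current_total := normalized.values.sum
  if current_total = target_total then normalized.items
  else
    let order := if priority_order = [] then normalized.keys else priority_order
    if order = [] then normalized.items
    else if current_total < target_total then
      let remaining := target_total - current_total
      let q := PySem.Int.floordiv remaining (order.length : Int)
      let r := PySem.Int.mod remaining (order.length : Int)
      (pvIncOnceB q r 0 order normalized).items
    else
      let overflow := current_total - target_total
      let rorder := order.reverse
      let mult := pvMultB rorder
      (pvFinalPassB rorder (pvShrinkLoopB (overflow.toNat + 1) mult (normalized, overflow))).1.items

-- ===== PRECONDITION & SPEC =====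
-- Pre_ excludes exactly the inputs on which A's shrink loop never terminates: clamped total
-- above target while the (distinct) keys of the round-robin order hold less than the excess.
def Pre_normalize_count_distribution_py (target_total : Int) (counts : List (String × Int)) (priority_order : List String) : Prop :=
  let d := counts.foldl (fun d p => d.insert p.1 (max 0 p.2)) (PySem.Dict.empty (κ := String) (ν := Int))
  let cur := d.values.sum
  cur ≤ target_total ∨
    (let order := if priority_order = [] then d.keys else priority_order
     order = [] ∨ cur - target_total ≤ ((PySem.Set.ofList order).map (fun k => d.getD k 0)).sum)

instance (target_total : Int) (counts : List (String × Int)) (priority_order : List String) : Decidable (Pre_normalize_count_distribution_py target_total counts priority_order) := by unfold Pre_normalize_count_distribution_py; infer_instance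

def pvWitness_normalize_count_distribution_py : Int × (List (String × Int)) × List String := (3, [("a", 1)], [])

def Spec_normalize_count_distribution_py (target_total : Int) (counts : List (String × Int)) (priority_order : List String) (out : List (String × Int)) : Prop := out = normalize_count_distribution_py_alt target_total counts priority_order
instance (target_total : Int) (counts : List (String × Int)) (priority_order : List String) (out : List (String × Int)) : Decidable (Spec_normalize_count_distribution_py target_total counts priority_order out) := by unfold Spec_normalize_count_distribution_py; infer_instance

-- ===== CLAIM (what is proved, stated in full; the proofs are below) =====
def Claim_equal_normalize_count_distribution_py : Prop := ∀ (target_total : Int) (counts : List (String × Int)) (priority_order : List String), Dom_normalize_count_distribution_py target_total counts priority_order → Pre_normalize_count_distribution_py target_total counts priority_order → Spec_normalize_count_distribution_py target_total counts priority_order (normalize_count_distribution_py target_total counts priority_order)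

-- ===== LEMMAS AND PROOFS =====

-- ---------- generic dictionary facts ----------

theorem pvClampB_eq : pvClampB = pvClampA := rfl

theorem pv_dict_items_ext {d e : PySem.Dict String Int} (hnd : d.keys.Nodup)
    (hk : d.keys = e.keys) (hg : ∀ k, d.getD k 0 = e.getD k 0) : d.items = e.items := by
  have h2 : e.keys.Nodup := hk ▸ hnd
  rw [PySem.Dict.items_eq_map_keys d hnd 0, PySem.Dict.items_eq_map_keys e h2 0, ← hk]
  exact List.map_congr_left (fun k _ => by rw [hg k])

theorem pv_dict_eq {d e : PySem.Dict String Int} (hnd : d.keys.Nodup)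
    (hk : d.keys = e.keys) (hg : ∀ k, d.getD k 0 = e.getD k 0) : d = e :=
  PySem.Dict.ext (pv_dict_items_ext hnd hk hg)

theorem pvClampA_nodup (counts : List (String × Int)) : (pvClampA counts).keys.Nodup :=
  PySem.Dict.nodup_keys_foldl_insert_key counts (fun p => p.1) (fun _ p => max 0 p.2)
    PySem.Dict.empty PySem.Dict.nodup_keys_empty

theorem pvClampA_nonneg_aux : ∀ (cs : List (String × Int)) (d : PySem.Dict String Int),
    (∀ k, 0 ≤ d.getD k 0) → ∀ k, 0 ≤ (cs.foldl (fun d p => d.insert p.1 (max 0 p.2)) d).getD k 0 := by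
  intro cs
  induction cs with
  | nil => intro d h k; exact h k
  | cons p tl ih =>
      intro d h k
      simp only [List.foldl_cons]
      refine ih _ (fun k' => ?_) k
      rw [PySem.Dict.getD_insert]
      split
      · exact le_max_left 0 _
      · exact h k'

theorem pvClampA_nonneg (counts : List (String × Int)) (k : String) :
    0 ≤ (pvClampA counts).getD k 0 :=
  pvClampA_nonneg_aux counts PySem.Dict.empty
    (fun k' => by rw [PySem.Dict.getD_empty]) k

theorem pv_contains_of_getD_pos {d : PySem.Dict String Int} {k : String}
    (h : 0 < d.getD k 0) : d.contains k = true := by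
  by_cases hc : d.contains k = true
  · exact hc
  · have hb : d.contains k = false := by simpa using hc
    rw [PySem.Dict.getD_of_not_contains d 0 hb] at h
    omega

theorem pv_contains_true_of_mem {d : PySem.Dict String Int} {k : String}
    (h : k ∈ d.keys) : d.contains k = true := (PySem.Dict.contains_iff_mem_keys d k).mpr h

theorem pv_contains_false_of_not_mem {d : PySem.Dict String Int} {k : String}
    (h : k ∉ d.keys) : d.contains k = false := by
  cases hcb : d.contains k
  · rfl
  · exact absurd ((PySem.Dict.contains_iff_mem_keys d k).mp hcb) h

-- keys of an insert-or-skip step, both cases in one lemma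
theorem pv_keys_insert_split (d : PySem.Dict String Int) (k : String) (v : Int) :
    (d.insert k v).keys = if k ∈ d.keys then d.keys else d.keys ++ [k] := by
  by_cases hmem : k ∈ d.keys
  · rw [if_pos hmem, PySem.Dict.keys_insert_of_contains d v (pv_contains_true_of_mem hmem)]
  · rw [if_neg hmem, PySem.Dict.keys_insert_of_not_contains d v (pv_contains_false_of_not_mem hmem)]

-- ---------- first-occurrence list of keys a pass adds ----------

def pvNewKeys : List String → List String → List String
  | _, [] => []
  | ks, k :: tl => if k ∈ ks then pvNewKeys ks tl else k :: pvNewKeys (ks ++ [k]) tl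

theorem pvNewKeys_cons (ks : List String) (k : String) (tl : List String) :
    pvNewKeys ks (k :: tl) = if k ∈ ks then pvNewKeys ks tl else k :: pvNewKeys (ks ++ [k]) tl := rfl

theorem pvNewKeys_subset : ∀ (l ks : List String) (k : String), k ∈ l → k ∈ ks ++ pvNewKeys ks l := by
  intro l
  induction l with
  | nil => intro ks k h; cases h
  | cons k0 tl ih =>
      intro ks k h
      unfold pvNewKeys
      by_cases hmem : k0 ∈ ks
      · simp only [if_pos hmem]
        rcases List.mem_cons.mp h with rfl | htl
        · exact List.mem_append_left _ hmem
        · exact ih ks k htl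
      · simp only [if_neg hmem]
        rcases List.mem_cons.mp h with rfl | htl
        · simp
        · have h2 := ih (ks ++ [k0]) k htl
          simpa [List.append_assoc] using h2

theorem pvNewKeys_nil_of_subset : ∀ (l ks : List String), (∀ k ∈ l, k ∈ ks) → pvNewKeys ks l = [] := by
  intro l
  induction l with
  | nil => intro ks _; rfl
  | cons k0 tl ih =>
      intro ks h
      unfold pvNewKeys
      rw [if_pos (h k0 List.mem_cons_self)]
      exact ih ks (fun k hk => h k (List.mem_cons_of_mem _ hk))

theorem pvNewKeys_nodup : ∀ (l ks : List String), ks.Nodup → (ks ++ pvNewKeys ks l).Nodup := by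
  intro l
  induction l with
  | nil => intro ks h; simpa [pvNewKeys] using h
  | cons k0 tl ih =>
      intro ks h
      unfold pvNewKeys
      by_cases hmem : k0 ∈ ks
      · rw [if_pos hmem]; exact ih ks h
      · rw [if_neg hmem]
        have h2 : (ks ++ [k0]).Nodup := by
          rw [List.nodup_append]
          refine ⟨h, List.nodup_singleton _, ?_⟩
          intro a ha b hbm
          rw [List.mem_singleton] at hbm
          subst hbm
          exact fun he => hmem (he ▸ ha)
        have := ih (ks ++ [k0]) h2
        simpa [List.append_assoc] using this

-- one insert followed by the new-keys of the tail equals the new-keys of the cons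
theorem pv_newKeys_insert_step (d : PySem.Dict String Int) (k0 : String) (v : Int) (tl : List String) :
    (d.insert k0 v).keys ++ pvNewKeys (d.insert k0 v).keys tl =
      d.keys ++ pvNewKeys d.keys (k0 :: tl) := by
  rw [pv_keys_insert_split, pvNewKeys_cons]
  by_cases hmem : k0 ∈ d.keys
  · rw [if_pos hmem, if_pos hmem]
  · rw [if_neg hmem, if_neg hmem]
    simp [List.append_assoc]

-- ---------- grow branch: B's single pass ----------

theorem pvIncOnceB_keys (q r : Int) (hq : 0 ≤ q) : ∀ (order : List String) (i : Int) (d : PySem.Dict String Int),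
    (pvIncOnceB q r i order d).keys =
      d.keys ++ pvNewKeys d.keys (if 0 < q then order else order.take (r - i).toNat) := by
  intro order
  induction order with
  | nil => intro i d; simp [pvIncOnceB, pvNewKeys]
  | cons k0 tl ih =>
      intro i d
      simp only [pvIncOnceB]
      by_cases hq0 : 0 < q
      · have hinc : 0 < q + (if i < r then 1 else 0) := by
          by_cases h : i < r <;> simp [h] <;> omega
        rw [if_pos hinc, ih]
        rw [if_pos hq0, if_pos hq0]
        exact pv_newKeys_insert_step d k0 _ tl
      · have hq' : q = 0 := by omega
        subst hq'
        by_cases hir : i < r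
        · have hinc : (0:Int) < 0 + (if i < r then 1 else 0) := by simp [hir]
          rw [if_pos hinc, ih, if_neg hq0, if_neg hq0]
          have ht : (r - i).toNat = (r - (i + 1)).toNat + 1 := by omega
          rw [ht, List.take_succ_cons]
          exact pv_newKeys_insert_step d k0 _ (List.take (r - (i + 1)).toNat tl)
        · have hinc : ¬ (0:Int) < 0 + (if i < r then 1 else 0) := by simp [hir]
          rw [if_neg hinc, ih, if_neg hq0, if_neg hq0]
          have h1 : (r - (i + 1)).toNat = 0 := by omega
          have h2 : (r - i).toNat = 0 := by omega
          rw [h1, h2]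
          simp

theorem pvIncOnceB_getD (q r : Int) (hq : 0 ≤ q) : ∀ (order : List String) (i : Int) (d : PySem.Dict String Int) (k : String),
    (pvIncOnceB q r i order d).getD k 0 =
      d.getD k 0 + q * (order.count k : Int) + ((order.take (r - i).toNat).count k : Int) := by
  intro order
  induction order with
  | nil => intro i d k; simp [pvIncOnceB]
  | cons k0 tl ih =>
      intro i d k
      simp only [pvIncOnceB]
      by_cases hir : i < r
      · have hinc : 0 < q + (if i < r then 1 else 0) := by simp [hir]; omega
        rw [if_pos hinc, ih]
        have ht : (r - i).toNat = (r - (i + 1)).toNat + 1 := by omega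
        rw [ht, List.take_succ_cons]
        rw [PySem.Dict.getD_insert]
        by_cases hk : k = k0
        · subst hk
          rw [if_pos rfl, if_pos hir]
          simp only [List.count_cons_self]
          push_cast
          ring
        · rw [if_neg hk]
          have hk' : ¬ k0 = k := fun h => hk h.symm
          simp [hk']
      · have h1 : (r - i).toNat = 0 := by omega
        have h2 : (r - (i + 1)).toNat = 0 := by omega
        by_cases hq0 : 0 < q
        · have hinc : 0 < q + (if i < r then 1 else 0) := by simp [hir]; omega
          rw [if_pos hinc, ih, h1, h2]
          rw [PySem.Dict.getD_insert]
          by_cases hk : k = k0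
          · subst hk
            rw [if_pos rfl, if_neg hir]
            simp
            ring
          · rw [if_neg hk]
            have hk' : ¬ k0 = k := fun h => hk h.symm
            simp [hk']
        · have hq' : q = 0 := by omega
          subst hq'
          have hinc : ¬ (0:Int) < 0 + (if i < r then 1 else 0) := by simp [hir]
          rw [if_neg hinc, ih, h1, h2]
          simp

-- ---------- grow branch: A's guarded cycle and loop ----------

theorem pvIncCycleA_snd : ∀ (order : List String) (d : PySem.Dict String Int) (rem : Int), 0 ≤ rem →
    (pvIncCycleA order (d, rem)).2 = max 0 (rem - order.length) := by
  intro order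
  induction order with
  | nil => intro d rem h; simp only [pvIncCycleA, List.foldl_nil]; simp; omega
  | cons k0 tl ih =>
      intro d rem h
      by_cases hrem : 0 < rem
      · have hstep : pvIncCycleA (k0 :: tl) (d, rem) =
            pvIncCycleA tl (d.insert k0 (d.getD k0 0 + 1), rem - 1) := by
          simp [pvIncCycleA, hrem]
        rw [hstep, ih _ _ (by omega)]
        simp only [List.length_cons]
        push_cast
        omega
      · have hstep : pvIncCycleA (k0 :: tl) (d, rem) = pvIncCycleA tl (d, rem) := by
          simp [pvIncCycleA, hrem]
        rw [hstep, ih _ _ h]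
        simp only [List.length_cons]
        push_cast
        omega

theorem pvIncCycleA_keys : ∀ (order : List String) (d : PySem.Dict String Int) (rem : Int), 0 ≤ rem →
    (pvIncCycleA order (d, rem)).1.keys = d.keys ++ pvNewKeys d.keys (order.take rem.toNat) := by
  intro order
  induction order with
  | nil => intro d rem h; simp [pvIncCycleA, pvNewKeys]
  | cons k0 tl ih =>
      intro d rem h
      by_cases hrem : 0 < rem
      · have hstep : pvIncCycleA (k0 :: tl) (d, rem) =
            pvIncCycleA tl (d.insert k0 (d.getD k0 0 + 1), rem - 1) := by
          simp [pvIncCycleA, hrem]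
        rw [hstep, ih _ _ (by omega)]
        have ht : rem.toNat = (rem - 1).toNat + 1 := by omega
        rw [ht, List.take_succ_cons]
        exact pv_newKeys_insert_step d k0 _ (List.take (rem - 1).toNat tl)
      · have hz : rem = 0 := by omega
        subst hz
        have hstep : pvIncCycleA (k0 :: tl) (d, 0) = pvIncCycleA tl (d, 0) := by
          simp [pvIncCycleA]
        rw [hstep, ih _ _ le_rfl]
        simp

theorem pvIncCycleA_getD : ∀ (order : List String) (d : PySem.Dict String Int) (rem : Int) (k : String), 0 ≤ rem →
    (pvIncCycleA order (d, rem)).1.getD k 0 = d.getD k 0 + ((order.take rem.toNat).count k : Int) := by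
  intro order
  induction order with
  | nil => intro d rem k h; simp [pvIncCycleA]
  | cons k0 tl ih =>
      intro d rem k h
      by_cases hrem : 0 < rem
      · have hstep : pvIncCycleA (k0 :: tl) (d, rem) =
            pvIncCycleA tl (d.insert k0 (d.getD k0 0 + 1), rem - 1) := by
          simp [pvIncCycleA, hrem]
        rw [hstep, ih _ _ _ (by omega)]
        have ht : rem.toNat = (rem - 1).toNat + 1 := by omega
        rw [ht, List.take_succ_cons, PySem.Dict.getD_insert]
        by_cases hk : k = k0
        · subst hk
          rw [if_pos rfl]
          simp only [List.count_cons_self]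
          push_cast
          ring
        · rw [if_neg hk]
          have hk' : ¬ k0 = k := fun hx => hk hx.symm
          simp [hk']
      · have hz : rem = 0 := by omega
        subst hz
        have hstep : pvIncCycleA (k0 :: tl) (d, 0) = pvIncCycleA tl (d, 0) := by
          simp [pvIncCycleA]
        rw [hstep, ih _ _ _ le_rfl]
        simp

theorem pvIncLoopA_spec (order : List String) (r : Int) (hr0 : 0 ≤ r) (hrL : r < order.length) :
    ∀ (qn : Nat) (fuel : Nat) (d : PySem.Dict String Int),
    qn + (if r = 0 then 0 else 1) < fuel →
    ((pvIncLoopA fuel order (d, (qn : Int) * order.length + r)).1.keys =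
        d.keys ++ pvNewKeys d.keys (if qn = 0 then order.take r.toNat else order)) ∧
    (∀ k, (pvIncLoopA fuel order (d, (qn : Int) * order.length + r)).1.getD k 0 =
        d.getD k 0 + (qn : Int) * (order.count k : Int) + ((order.take r.toNat).count k : Int)) := by
  have hL : 0 < (order.length : Int) := lt_of_le_of_lt hr0 hrL
  intro qn
  induction qn with
  | zero =>
      intro fuel d hfuel
      cases fuel with
      | zero => exact absurd hfuel (by omega)
      | succ f =>
          have hrem : ((0 : Nat) : Int) * (order.length : Int) + r = r := by push_cast; ring
          rw [hrem]
          by_cases hr : r = 0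
          · subst hr
            have hret : pvIncLoopA (f + 1) order (d, 0) = (d, 0) := by
              simp [pvIncLoopA]
            rw [hret]
            refine ⟨by simp [pvNewKeys], fun k => by simp⟩
          · have hrpos : 0 < r := by omega
            have hg : pvIncLoopA (f + 1) order (d, r) =
                pvIncLoopA f order (pvIncCycleA order (d, r)) := by
              simp only [pvIncLoopA]
              rw [if_neg (by simpa using hrpos.not_ge)]
            have hsnd0 : (pvIncCycleA order (d, r)).2 = 0 := by
              rw [pvIncCycleA_snd order d r (le_of_lt hrpos)]
              omega
            have hpair : pvIncCycleA order (d, r) = ((pvIncCycleA order (d, r)).1, 0) := by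
              rw [← hsnd0]
            cases f with
            | zero => exact absurd hfuel (by simp [hr])
            | succ f' =>
                rw [hg, hpair]
                have hret : pvIncLoopA (f' + 1) order ((pvIncCycleA order (d, r)).1, 0) =
                    ((pvIncCycleA order (d, r)).1, 0) := by simp [pvIncLoopA]
                rw [hret]
                constructor
                · rw [pvIncCycleA_keys order d r (le_of_lt hrpos)]
                  simp
                · intro k
                  rw [pvIncCycleA_getD order d r k (le_of_lt hrpos)]
                  simp
  | succ qn ih =>
      intro fuel d hfuel
      cases fuel with
      | zero => exact absurd hfuel (by omega)
      | succ f =>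
          have hM : 0 ≤ (qn : Int) * (order.length : Int) :=
            mul_nonneg (Int.natCast_nonneg qn) (le_of_lt hL)
          have hrem : ((qn + 1 : Nat) : Int) * (order.length : Int) + r =
              (qn : Int) * (order.length : Int) + r + (order.length : Int) := by push_cast; ring
          have hpos : 0 < ((qn + 1 : Nat) : Int) * (order.length : Int) + r := by
            rw [hrem]; omega
          have hg : pvIncLoopA (f + 1) order (d, ((qn + 1 : Nat) : Int) * (order.length : Int) + r) =
              pvIncLoopA f order (pvIncCycleA order (d, ((qn + 1 : Nat) : Int) * (order.length : Int) + r)) := by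
            simp only [pvIncLoopA]
            rw [if_neg (by simpa using hpos.not_ge)]
          have hsnd : (pvIncCycleA order (d, ((qn + 1 : Nat) : Int) * (order.length : Int) + r)).2 =
              (qn : Int) * (order.length : Int) + r := by
            rw [pvIncCycleA_snd order d _ (le_of_lt hpos), hrem]
            omega
          have hpair : pvIncCycleA order (d, ((qn + 1 : Nat) : Int) * (order.length : Int) + r) =
              ((pvIncCycleA order (d, ((qn + 1 : Nat) : Int) * (order.length : Int) + r)).1,
                (qn : Int) * (order.length : Int) + r) := by
            rw [← hsnd]
          have htake : List.take (((qn + 1 : Nat) : Int) * (order.length : Int) + r).toNat order = order := by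
            apply List.take_of_length_le
            rw [hrem]
            omega
          have hd1keys : (pvIncCycleA order (d, ((qn + 1 : Nat) : Int) * (order.length : Int) + r)).1.keys =
              d.keys ++ pvNewKeys d.keys order := by
            rw [pvIncCycleA_keys order d _ (le_of_lt hpos), htake]
          have hd1getD : ∀ k, (pvIncCycleA order (d, ((qn + 1 : Nat) : Int) * (order.length : Int) + r)).1.getD k 0 =
              d.getD k 0 + (order.count k : Int) := by
            intro k
            rw [pvIncCycleA_getD order d _ k (le_of_lt hpos), htake]
          have hsub : ∀ k ∈ order, k ∈ (pvIncCycleA order (d, ((qn + 1 : Nat) : Int) * (order.length : Int) + r)).1.keys := by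
            intro k hk
            rw [hd1keys]
            exact pvNewKeys_subset order d.keys k hk
          have hih := ih f (pvIncCycleA order (d, ((qn + 1 : Nat) : Int) * (order.length : Int) + r)).1
            (by omega)
          rw [hg, hpair]
          constructor
          · rw [hih.1]
            have hnil : pvNewKeys (pvIncCycleA order (d, ((qn + 1 : Nat) : Int) * (order.length : Int) + r)).1.keys
                (if qn = 0 then order.take r.toNat else order) = [] := by
              apply pvNewKeys_nil_of_subset
              intro k hk
              apply hsub
              by_cases hq : qn = 0
              · rw [if_pos hq] at hk; exact List.mem_of_mem_take hk
              · rw [if_neg hq] at hk; exact hk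
            rw [hnil, List.append_nil, hd1keys]
            simp
          · intro k
            rw [hih.2 k, hd1getD k]
            push_cast
            ring

-- ---------- shrink branch: unguarded single cycle and its removal ----------

def pvDecOne (d : PySem.Dict String Int) (k : String) : PySem.Dict String Int :=
  if 0 < d.getD k 0 then d.insert k (d.getD k 0 - 1) else d

def pvU : PySem.Dict String Int → List String → PySem.Dict String Int
  | d, [] => d
  | d, k :: tl => pvU (pvDecOne d k) tl

def pvR : PySem.Dict String Int → List String → Int
  | _, [] => 0
  | d, k :: tl => (if 0 < d.getD k 0 then 1 else 0) + pvR (pvDecOne d k) tl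

def pvCap (d : PySem.Dict String Int) (K : List String) : Int :=
  (K.map (fun k => d.getD k 0)).sum

theorem pvR_nonneg : ∀ (l : List String) (d : PySem.Dict String Int), 0 ≤ pvR d l := by
  intro l
  induction l with
  | nil => intro d; simp [pvR]
  | cons k0 tl ih =>
      intro d
      have h := ih (pvDecOne d k0)
      simp only [pvR]
      split <;> omega

theorem pvDecCycleA_of_nonpos : ∀ (l : List String) (d : PySem.Dict String Int) (ov : Int),
    ov ≤ 0 → pvDecCycleA l (d, ov) = (d, ov) := by
  intro l
  induction l with
  | nil => intro d ov _; rfl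
  | cons k0 tl ih =>
      intro d ov h
      have hno : ¬ (0:Int) < ov := by omega
      have hstep : pvDecCycleA (k0 :: tl) (d, ov) = pvDecCycleA tl (d, ov) := by
        simp [pvDecCycleA, hno]
      rw [hstep, ih d ov h]

theorem pvDecCycleA_of_le : ∀ (l : List String) (d : PySem.Dict String Int) (ov : Int),
    pvR d l ≤ ov → pvDecCycleA l (d, ov) = (pvU d l, ov - pvR d l) := by
  intro l
  induction l with
  | nil => intro d ov _; simp [pvDecCycleA, pvU, pvR]
  | cons k0 tl ih =>
      intro d ov h
      have hR' := pvR_nonneg tl (pvDecOne d k0)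
      by_cases hv : 0 < d.getD k0 0
      · have hR : pvR d (k0 :: tl) = 1 + pvR (pvDecOne d k0) tl := by
          simp [pvR, hv]
        have hovpos : 0 < ov := by rw [hR] at h; omega
        have hstep : pvDecCycleA (k0 :: tl) (d, ov) =
            pvDecCycleA tl (d.insert k0 (d.getD k0 0 - 1), ov - 1) := by
          simp [pvDecCycleA, hv, hovpos]
        have hdec : pvDecOne d k0 = d.insert k0 (d.getD k0 0 - 1) := by
          simp [pvDecOne, hv]
        rw [hstep, ← hdec, ih _ _ (by rw [hR] at h; omega)]
        have hU : pvU d (k0 :: tl) = pvU (pvDecOne d k0) tl := rfl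
        rw [hU, hR]
        congr 1
        ring
      · have hR : pvR d (k0 :: tl) = pvR (pvDecOne d k0) tl := by
          simp [pvR, hv]
        have hdec : pvDecOne d k0 = d := by simp [pvDecOne, hv]
        have hstep : pvDecCycleA (k0 :: tl) (d, ov) = pvDecCycleA tl (d, ov) := by
          simp [pvDecCycleA, hv]
        rw [hstep, ih d ov (by rw [hR, hdec] at h; exact h)]
        have hU : pvU d (k0 :: tl) = pvU (pvDecOne d k0) tl := rfl
        rw [hU, hR, hdec]

theorem pvDecCycleA_partial_snd : ∀ (l : List String) (d : PySem.Dict String Int) (ov : Int),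
    0 ≤ ov → ov ≤ pvR d l → (pvDecCycleA l (d, ov)).2 = 0 := by
  intro l
  induction l with
  | nil => intro d ov h1 h2; simp [pvR] at h2; simp [pvDecCycleA]; omega
  | cons k0 tl ih =>
      intro d ov h1 h2
      by_cases hv : 0 < d.getD k0 0
      · have hR : pvR d (k0 :: tl) = 1 + pvR (pvDecOne d k0) tl := by
          simp [pvR, hv]
        have hdec : pvDecOne d k0 = d.insert k0 (d.getD k0 0 - 1) := by
          simp [pvDecOne, hv]
        by_cases hov : 0 < ov
        · have hstep : pvDecCycleA (k0 :: tl) (d, ov) =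
              pvDecCycleA tl (d.insert k0 (d.getD k0 0 - 1), ov - 1) := by
            simp [pvDecCycleA, hv, hov]
          rw [hstep, ← hdec]
          exact ih _ _ (by omega) (by rw [hR] at h2; omega)
        · have hz : ov = 0 := by omega
          subst hz
          have hstep : pvDecCycleA (k0 :: tl) (d, 0) = pvDecCycleA tl (d, 0) := by
            simp [pvDecCycleA]
          rw [hstep, pvDecCycleA_of_nonpos tl d 0 le_rfl]
      · have hR : pvR d (k0 :: tl) = pvR (pvDecOne d k0) tl := by
          simp [pvR, hv]
        have hdec : pvDecOne d k0 = d := by simp [pvDecOne, hv]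
        have hstep : pvDecCycleA (k0 :: tl) (d, ov) = pvDecCycleA tl (d, ov) := by
          simp [pvDecCycleA, hv]
        rw [hstep]
        exact ih d ov h1 (by rw [hR, hdec] at h2; exact h2)

theorem pvFinalPassB_eq_dec : ∀ (l : List String) (st : PySem.Dict String Int × Int),
    pvFinalPassB l st = pvDecCycleA l st := by
  intro l st
  unfold pvFinalPassB pvDecCycleA
  have hfun : (fun (st : PySem.Dict String Int × Int) (k : String) =>
      if st.2 ≤ 0 then st
      else if st.1.getD k 0 > 0 then (st.1.insert k (st.1.getD k 0 - 1), st.2 - 1) else st) =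
      (fun (st : PySem.Dict String Int × Int) (k : String) =>
      if st.2 > 0 then
        if st.1.getD k 0 > 0 then (st.1.insert k (st.1.getD k 0 - 1), st.2 - 1) else st
      else st) := by
    funext st k
    by_cases h : st.2 ≤ 0
    · rw [if_pos h, if_neg (show ¬ st.2 > 0 by omega)]
    · rw [if_neg h, if_pos (show st.2 > 0 by omega)]
  rw [hfun]

theorem pvDecOne_getD {d : PySem.Dict String Int} (k0 k : String) :
    (pvDecOne d k0).getD k 0 =
      if k = k0 ∧ 0 < d.getD k0 0 then d.getD k0 0 - 1 else d.getD k 0 := by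
  unfold pvDecOne
  by_cases hv : 0 < d.getD k0 0
  · rw [if_pos hv, PySem.Dict.getD_insert]
    by_cases hk : k = k0
    · rw [if_pos hk, if_pos ⟨hk, hv⟩]
    · rw [if_neg hk, if_neg (fun h => hk h.1)]
  · rw [if_neg hv, if_neg (fun h => hv h.2)]

theorem pvDecOne_nonneg {d : PySem.Dict String Int} (hnn : ∀ k, 0 ≤ d.getD k 0) (k0 k : String) :
    0 ≤ (pvDecOne d k0).getD k 0 := by
  rw [pvDecOne_getD]
  split
  · next h => have := hnn k0; omega
  · exact hnn k

theorem pvDecOne_keys (d : PySem.Dict String Int) (k0 : String) :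
    (pvDecOne d k0).keys = d.keys := by
  unfold pvDecOne
  split
  · next h => exact PySem.Dict.keys_insert_of_contains d _ (pv_contains_of_getD_pos h)
  · rfl

theorem pvU_keys : ∀ (l : List String) (d : PySem.Dict String Int), (pvU d l).keys = d.keys := by
  intro l
  induction l with
  | nil => intro d; rfl
  | cons k0 tl ih => intro d; rw [show pvU d (k0 :: tl) = pvU (pvDecOne d k0) tl from rfl,
      ih (pvDecOne d k0), pvDecOne_keys]

theorem pvU_getD : ∀ (l : List String) (d : PySem.Dict String Int), (∀ k, 0 ≤ d.getD k 0) →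
    ∀ k, (pvU d l).getD k 0 = max 0 (d.getD k 0 - (l.count k : Int)) := by
  intro l
  induction l with
  | nil => intro d hnn k; have := hnn k; simp [pvU]; omega
  | cons k0 tl ih =>
      intro d hnn k
      rw [show pvU d (k0 :: tl) = pvU (pvDecOne d k0) tl from rfl,
        ih _ (pvDecOne_nonneg hnn k0) k, pvDecOne_getD]
      by_cases hk : k = k0
      · subst hk
        have hc := hnn k
        simp only [List.count_cons_self]
        split_ifs with h
        · obtain ⟨-, hv⟩ := h
          push_cast
          omega
        · have hv : ¬ 0 < d.getD k 0 := fun hv => h ⟨by trivial, hv⟩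
          push_cast
          omega
      · rw [if_neg (fun h => hk h.1)]
        have hk' : ¬ k0 = k := fun hx => hk hx.symm
        simp [hk']

theorem pvU_nonneg : ∀ (l : List String) (d : PySem.Dict String Int), (∀ k, 0 ≤ d.getD k 0) →
    ∀ k, 0 ≤ (pvU d l).getD k 0 := by
  intro l d hnn k
  rw [pvU_getD l d hnn k]
  omega

theorem pv_sum_map_diff_single : ∀ (K : List String) (f g : String → Int) (k0 : String),
    K.Nodup → k0 ∈ K → (∀ k ∈ K, k ≠ k0 → f k = g k) →
    (K.map f).sum = (K.map g).sum + (f k0 - g k0) := by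
  intro K
  induction K with
  | nil => intro f g k0 _ h; cases h
  | cons a K ih =>
      intro f g k0 hnd hmem hfg
      have hnd' : a ∉ K ∧ K.Nodup := List.nodup_cons.mp hnd
      simp only [List.map_cons, List.sum_cons]
      rcases List.mem_cons.mp hmem with rfl | hK
      · have heq : ∀ k ∈ K, f k = g k := by
          intro k hk
          exact hfg k (List.mem_cons_of_mem _ hk) (fun he => hnd'.1 (he ▸ hk))
        rw [List.map_congr_left heq]
        ring
      · have ha : f a = g a := hfg a List.mem_cons_self (fun he => hnd'.1 (he ▸ hK))
        rw [ih f g k0 hnd'.2 hK (fun k hk hne => hfg k (List.mem_cons_of_mem _ hk) hne), ha]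
        ring

theorem pv_sum_map_sub (K : List String) (f g : String → Int) :
    (K.map (fun k => f k - g k)).sum = (K.map f).sum - (K.map g).sum := by
  induction K with
  | nil => simp
  | cons a K ih => simp only [List.map_cons, List.sum_cons, ih]; ring

theorem pvR_eq_sum : ∀ (l : List String) (d : PySem.Dict String Int) (K : List String),
    (∀ k, 0 ≤ d.getD k 0) → K.Nodup → (∀ k ∈ l, k ∈ K) →
    pvR d l = (K.map (fun k => min (d.getD k 0) (l.count k : Int))).sum := by
  intro l
  induction l with
  | nil =>
      intro d K hnn _ _
      have hz : ∀ x ∈ K.map (fun k => min (d.getD k 0) (([] : List String).count k : Int)), x = 0 := by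
        intro x hx
        obtain ⟨k, _, rfl⟩ := List.mem_map.mp hx
        have := hnn k
        simp
        omega
      rw [List.sum_eq_zero hz]
      rfl
  | cons k0 tl ih =>
      intro d K hnn hnd hsub
      have hR : pvR d (k0 :: tl) = (if 0 < d.getD k0 0 then 1 else 0) + pvR (pvDecOne d k0) tl := rfl
      have hk0K : k0 ∈ K := hsub k0 List.mem_cons_self
      have hih := ih (pvDecOne d k0) K (pvDecOne_nonneg hnn k0) hnd
        (fun k hk => hsub k (List.mem_cons_of_mem _ hk))
      have hdiff := pv_sum_map_diff_single K
        (fun k => min (d.getD k 0) ((k0 :: tl).count k : Int))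
        (fun k => min ((pvDecOne d k0).getD k 0) (tl.count k : Int)) k0 hnd hk0K ?_
      · rw [hR, hih, hdiff]
        simp only []
        have h1 : (pvDecOne d k0).getD k0 0 = if 0 < d.getD k0 0 then d.getD k0 0 - 1 else d.getD k0 0 := by
          rw [pvDecOne_getD]
          by_cases hv : 0 < d.getD k0 0
          · rw [if_pos ⟨rfl, hv⟩, if_pos hv]
          · rw [if_neg (fun h => hv h.2), if_neg hv]
        rw [h1]
        have hc := hnn k0
        simp only [List.count_cons_self]
        split_ifs with hv
        · push_cast; omega
        · push_cast; omega
      · intro k _ hne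
        have hk' : ¬ k0 = k := fun hx => hne hx.symm
        simp only []
        rw [pvDecOne_getD, if_neg (fun h => hne h.1)]
        simp [hk']

theorem pvMultB_eq_counter (l : List String) : pvMultB l = PySem.Dict.counter l :=
  PySem.Dict.foldl_insert_getD_add_one_eq_counter l

theorem pvStepB_eq_R (l : List String) (d : PySem.Dict String Int) (hnn : ∀ k, 0 ≤ d.getD k 0) :
    pvStepB d (pvMultB l) = pvR d l := by
  unfold pvStepB
  rw [pvMultB_eq_counter, PySem.Dict.items_counter, List.map_map,
    pvR_eq_sum l d (PySem.Set.ofList l) hnn (PySem.Set.nodup_ofList l)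
      (fun k hk => (PySem.Set.mem_ofList l k).mpr hk)]
  rfl

theorem pvBatch_fold_keys : ∀ (ps : List (String × Int)) (d : PySem.Dict String Int),
    (ps.foldl (fun d km =>
      if d.getD km.1 0 > 0 then d.insert km.1 (max 0 (d.getD km.1 0 - km.2)) else d) d).keys = d.keys := by
  intro ps
  induction ps with
  | nil => intro d; rfl
  | cons p tl ih =>
      intro d
      simp only [List.foldl_cons]
      rw [ih]
      split
      · next h => exact PySem.Dict.keys_insert_of_contains d _ (pv_contains_of_getD_pos h)
      · rfl

theorem pvBatch_fold_getD_not_mem : ∀ (ps : List (String × Int)) (d : PySem.Dict String Int) (k : String),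
    k ∉ ps.map Prod.fst →
    (ps.foldl (fun d km =>
      if d.getD km.1 0 > 0 then d.insert km.1 (max 0 (d.getD km.1 0 - km.2)) else d) d).getD k 0 = d.getD k 0 := by
  intro ps
  induction ps with
  | nil => intro d k _; rfl
  | cons p tl ih =>
      intro d k hk
      simp only [List.map_cons, List.mem_cons, not_or] at hk
      simp only [List.foldl_cons]
      rw [ih _ _ hk.2]
      split
      · rw [PySem.Dict.getD_insert, if_neg hk.1]
      · rfl

theorem pvBatch_fold_getD : ∀ (ps : List (String × Int)) (d : PySem.Dict String Int) (k : String) (m : Int),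
    (k, m) ∈ ps → (ps.map Prod.fst).Nodup → (∀ k', 0 ≤ d.getD k' 0) → 0 ≤ m →
    (ps.foldl (fun d km =>
      if d.getD km.1 0 > 0 then d.insert km.1 (max 0 (d.getD km.1 0 - km.2)) else d) d).getD k 0 =
      max 0 (d.getD k 0 - m) := by
  intro ps
  induction ps with
  | nil => intro d k m h; cases h
  | cons p tl ih =>
      intro d k m hmem hnd hnn hm
      rw [List.map_cons] at hnd
      have hnd' := List.nodup_cons.mp hnd
      simp only [List.foldl_cons]
      rcases List.mem_cons.mp hmem with heq | htl
      · have hk : p.1 = k := by rw [← heq]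
        have hm2 : p.2 = m := by rw [← heq]
        rw [hk, hm2]
        have hknot : k ∉ tl.map Prod.fst := hk ▸ hnd'.1
        split
        · next h =>
            rw [pvBatch_fold_getD_not_mem tl _ _ hknot, PySem.Dict.getD_insert, if_pos rfl]
        · next h =>
            rw [pvBatch_fold_getD_not_mem tl _ _ hknot]
            have := hnn k
            omega
      · have hkne : k ≠ p.1 := by
          intro he
          apply hnd'.1
          rw [← he]
          exact List.mem_map_of_mem htl
        split
        · next h =>
            rw [ih _ _ _ htl hnd'.2 (fun k' => by
              rw [PySem.Dict.getD_insert]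
              split
              · omega
              · exact hnn k') hm]
            rw [PySem.Dict.getD_insert, if_neg hkne]
        · next h => rw [ih _ _ _ htl hnd'.2 hnn hm]

theorem pvBatchB_eq_U (l : List String) (d : PySem.Dict String Int)
    (hnn : ∀ k, 0 ≤ d.getD k 0) (hnd : d.keys.Nodup) :
    pvBatchB d (pvMultB l) = pvU d l := by
  unfold pvBatchB
  rw [pvMultB_eq_counter]
  have hkeys : ((PySem.Dict.counter l).items.foldl (fun d km =>
      if d.getD km.1 0 > 0 then d.insert km.1 (max 0 (d.getD km.1 0 - km.2)) else d) d).keys = d.keys :=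
    pvBatch_fold_keys _ d
  apply pv_dict_eq (hkeys ▸ hnd) (by rw [hkeys, pvU_keys])
  intro k
  have hndf : ((PySem.Dict.counter l).items.map Prod.fst).Nodup := by
    have : (PySem.Dict.counter l).items.map Prod.fst = (PySem.Dict.counter l).keys := rfl
    rw [this]
    exact PySem.Dict.nodup_keys_counter l
  by_cases hkl : k ∈ l
  · have hmem : (k, (l.count k : Int)) ∈ (PySem.Dict.counter l).items := by
      rw [PySem.Dict.items_counter]
      exact List.mem_map_of_mem ((PySem.Set.mem_ofList l k).mpr hkl)
    rw [pvBatch_fold_getD _ d k _ hmem hndf hnn (by positivity), pvU_getD l d hnn k]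
  · have hnotf : k ∉ (PySem.Dict.counter l).items.map Prod.fst := by
      rw [PySem.Dict.items_counter]
      intro hx
      rw [List.map_map] at hx
      obtain ⟨k', hk', he⟩ := List.mem_map.mp hx
      simp at he
      exact hkl (he ▸ (PySem.Set.mem_ofList l k').mp hk')
    rw [pvBatch_fold_getD_not_mem _ d k hnotf, pvU_getD l d hnn k]
    have h0 : l.count k = 0 := List.count_eq_zero.mpr hkl
    rw [h0]
    have := hnn k
    simp
    omega

theorem pvCap_U (l : List String) (d : PySem.Dict String Int) (hnn : ∀ k, 0 ≤ d.getD k 0) :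
    pvCap (pvU d l) (PySem.Set.ofList l) = pvCap d (PySem.Set.ofList l) - pvR d l := by
  unfold pvCap
  rw [pvR_eq_sum l d (PySem.Set.ofList l) hnn (PySem.Set.nodup_ofList l)
    (fun k hk => (PySem.Set.mem_ofList l k).mpr hk)]
  rw [← pv_sum_map_sub]
  refine congrArg List.sum ?_
  apply List.map_congr_left
  intro k _
  rw [pvU_getD l d hnn k]
  have := hnn k
  omega

theorem pvR_pos (l : List String) (d : PySem.Dict String Int) (hnn : ∀ k, 0 ≤ d.getD k 0)
    (hcap : 0 < pvCap d (PySem.Set.ofList l)) : 0 < pvR d l := by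
  have hlt : ((PySem.Set.ofList l).map (fun _ => (0:Int))).sum <
      ((PySem.Set.ofList l).map (fun k => d.getD k 0)).sum := by
    have hz : ((PySem.Set.ofList l).map (fun _ => (0:Int))).sum = 0 := by simp
    rw [hz]
    exact hcap
  obtain ⟨k, hkK, hk⟩ := List.exists_lt_of_sum_lt _ _ hlt
  have hkl : k ∈ l := (PySem.Set.mem_ofList l k).mp hkK
  have hcnt : 1 ≤ (l.count k : Int) := by
    have := List.count_pos_iff.mpr hkl
    omega
  rw [pvR_eq_sum l d (PySem.Set.ofList l) hnn (PySem.Set.nodup_ofList l)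
    (fun k hk => (PySem.Set.mem_ofList l k).mpr hk)]
  have hmem : min (d.getD k 0) (l.count k : Int) ∈
      (PySem.Set.ofList l).map (fun k => min (d.getD k 0) (l.count k : Int)) :=
    List.mem_map_of_mem hkK
  have hterm : 1 ≤ min (d.getD k 0) (l.count k : Int) := by omega
  have hle := List.single_le_sum (l := (PySem.Set.ofList l).map (fun k => min (d.getD k 0) (l.count k : Int)))
    (by
      intro x hx
      obtain ⟨k', hk', rfl⟩ := List.mem_map.mp hx
      have h1 := hnn k'
      have h2 : (0:Int) ≤ (l.count k' : Int) := by positivity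
      omega) _ hmem
  omega

-- when the excess is already 0 both loops stop at once
theorem pvShrink_zero (l : List String) (fuel : Nat) (d : PySem.Dict String Int) :
    (pvDecLoopA (fuel + 1) l (d, 0)).1 = d ∧
      (pvFinalPassB l (pvShrinkLoopB (fuel + 1) (pvMultB l) (d, 0))).1 = d := by
  constructor
  · simp [pvDecLoopA]
  · have hexit : pvShrinkLoopB (fuel + 1) (pvMultB l) (d, 0) = (d, 0) := by
      simp only [pvShrinkLoopB]
      rw [if_pos]
      by_cases hs : pvStepB d (pvMultB l) ≤ 0
      · exact Or.inl hs
      · exact Or.inr (by omega)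
    rw [hexit, pvFinalPassB_eq_dec, pvDecCycleA_of_nonpos l d 0 le_rfl]

theorem pvShrink_main (l : List String) : ∀ (n : Nat) (d : PySem.Dict String Int) (ov : Int),
    (∀ k, 0 ≤ d.getD k 0) → d.keys.Nodup → 0 ≤ ov → ov.toNat ≤ n →
    ov ≤ pvCap d (PySem.Set.ofList l) →
    (pvDecLoopA (n + 1) l (d, ov)).1 =
      (pvFinalPassB l (pvShrinkLoopB (n + 1) (pvMultB l) (d, ov))).1 := by
  intro n
  induction n with
  | zero =>
      intro d ov hnn hnd hov hovn hcap
      have hz : ov = 0 := by omega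
      subst hz
      rw [(pvShrink_zero l 0 d).1, (pvShrink_zero l 0 d).2]
  | succ n ihn =>
      intro d ov hnn hnd hov hovn hcap
      by_cases hz : ov = 0
      · subst hz
        rw [(pvShrink_zero l (n + 1) d).1, (pvShrink_zero l (n + 1) d).2]
      · have hovpos : 0 < ov := by omega
        have hstep : pvStepB d (pvMultB l) = pvR d l := pvStepB_eq_R l d hnn
        have hR0 : 0 < pvR d l := pvR_pos l d hnn (lt_of_lt_of_le hovpos hcap)
        have hgA : pvDecLoopA (n + 1 + 1) l (d, ov) =
            pvDecLoopA (n + 1) l (pvDecCycleA l (d, ov)) := by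
          simp only [pvDecLoopA]
          rw [if_neg (show ¬ ((d, ov).2 ≤ 0) by simpa using hovpos.not_ge)]
        by_cases hle : pvR d l ≤ ov
        · have hgB : pvShrinkLoopB (n + 1 + 1) (pvMultB l) (d, ov) =
              pvShrinkLoopB (n + 1) (pvMultB l) (pvBatchB d (pvMultB l), ov - pvStepB d (pvMultB l)) := by
            simp only [pvShrinkLoopB]
            rw [if_neg]
            rw [hstep]
            intro hc
            rcases hc with hc | hc <;> omega
          rw [hgA, hgB, pvDecCycleA_of_le l d ov hle, pvBatchB_eq_U l d hnn hnd, hstep]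
          exact ihn (pvU d l) (ov - pvR d l) (pvU_nonneg l d hnn)
            (by rw [pvU_keys]; exact hnd) (by omega) (by omega)
            (by rw [pvCap_U l d hnn]; omega)
        · have hgB : pvShrinkLoopB (n + 1 + 1) (pvMultB l) (d, ov) = (d, ov) := by
            simp only [pvShrinkLoopB]
            rw [if_pos]
            exact Or.inr (by rw [hstep]; omega)
          have hsnd : (pvDecCycleA l (d, ov)).2 = 0 :=
            pvDecCycleA_partial_snd l d ov hov (by omega)
          have hpair : pvDecCycleA l (d, ov) = ((pvDecCycleA l (d, ov)).1, 0) := by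
            rw [← hsnd]
          have hret : pvDecLoopA (n + 1) l ((pvDecCycleA l (d, ov)).1, 0) =
              ((pvDecCycleA l (d, ov)).1, 0) := by
            cases n with
            | zero => simp [pvDecLoopA]
            | succ n' => simp [pvDecLoopA]
          rw [hgA, hpair, hret, hgB, pvFinalPassB_eq_dec]

theorem pvCap_perm (d : PySem.Dict String Int) {K K' : List String}
    (h : K.Perm K') : pvCap d K = pvCap d K' :=
  List.Perm.sum_eq (h.map _)

-- ---------- branch bridges ----------

theorem pv_main_increase (d0 : PySem.Dict String Int) (order : List String) (t cur : Int)
    (hnd : d0.keys.Nodup) (hord : order ≠ []) (hlt : cur < t) :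
    (pvIncLoopA ((t - cur).toNat + 1) order (d0, t - cur)).1.items =
      (pvIncOnceB (PySem.Int.floordiv (t - cur) (order.length : Int))
        (PySem.Int.mod (t - cur) (order.length : Int)) 0 order d0).items := by
  have hL : 0 < (order.length : Int) := by
    have := List.length_pos_iff.mpr hord
    exact_mod_cast this
  have hr0 : 0 ≤ PySem.Int.mod (t - cur) (order.length : Int) := PySem.Int.mod_nonneg _ hL
  have hrL : PySem.Int.mod (t - cur) (order.length : Int) < (order.length : Int) :=
    PySem.Int.mod_lt _ hL
  have hqr := PySem.Int.floordiv_mul_add_mod (t - cur) (order.length : Int)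
  have hq0 : 0 ≤ PySem.Int.floordiv (t - cur) (order.length : Int) := by
    by_contra hq
    have h1 : PySem.Int.floordiv (t - cur) (order.length : Int) * (order.length : Int) ≤
        -1 * (order.length : Int) :=
      mul_le_mul_of_nonneg_right (by omega) (le_of_lt hL)
    omega
  have hqn : ((PySem.Int.floordiv (t - cur) (order.length : Int)).toNat : Int) =
      PySem.Int.floordiv (t - cur) (order.length : Int) := Int.toNat_of_nonneg hq0
  have hql : PySem.Int.floordiv (t - cur) (order.length : Int) * 1 ≤
      PySem.Int.floordiv (t - cur) (order.length : Int) * (order.length : Int) :=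
    mul_le_mul_of_nonneg_left (by omega) hq0
  have hfuel : (PySem.Int.floordiv (t - cur) (order.length : Int)).toNat +
      (if PySem.Int.mod (t - cur) (order.length : Int) = 0 then 0 else 1) < (t - cur).toNat + 1 := by
    split_ifs with hr <;> omega
  obtain ⟨hkeysA, hgetDA⟩ := pvIncLoopA_spec order (PySem.Int.mod (t - cur) (order.length : Int))
    hr0 hrL (PySem.Int.floordiv (t - cur) (order.length : Int)).toNat ((t - cur).toNat + 1) d0 hfuel
  have hrw : t - cur = ((PySem.Int.floordiv (t - cur) (order.length : Int)).toNat : Int) *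
      (order.length : Int) + PySem.Int.mod (t - cur) (order.length : Int) := by
    rw [hqn]; omega
  have hsel : (if (PySem.Int.floordiv (t - cur) (order.length : Int)).toNat = 0 then
        order.take (PySem.Int.mod (t - cur) (order.length : Int)).toNat else order) =
      (if 0 < PySem.Int.floordiv (t - cur) (order.length : Int) then order
        else order.take (PySem.Int.mod (t - cur) (order.length : Int) - 0).toNat) := by
    by_cases hq : 0 < PySem.Int.floordiv (t - cur) (order.length : Int)
    · rw [if_pos hq, if_neg (by omega)]
    · rw [if_neg hq, if_pos (by omega)]
      norm_num
  rw [← hrw] at hkeysA hgetDA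
  apply pv_dict_items_ext
  · rw [hkeysA]
    exact pvNewKeys_nodup _ _ hnd
  · rw [hkeysA, pvIncOnceB_keys _ _ hq0 order 0 d0, hsel]
  · intro k
    rw [hgetDA k, pvIncOnceB_getD _ _ hq0 order 0 d0 k, hqn]
    norm_num

theorem pv_main_shrink (d0 : PySem.Dict String Int) (order : List String) (ov : Int)
    (hnn : ∀ k, 0 ≤ d0.getD k 0) (hnd : d0.keys.Nodup) (hpos : 0 < ov)
    (hcap : ov ≤ pvCap d0 (PySem.Set.ofList order)) :
    (pvDecLoopA (ov.toNat + 1) order.reverse (d0, ov)).1.items =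
      (pvFinalPassB order.reverse (pvShrinkLoopB (ov.toNat + 1) (pvMultB order.reverse) (d0, ov))).1.items := by
  have hperm : (PySem.Set.ofList order).Perm (PySem.Set.ofList order.reverse) :=
    (List.perm_ext_iff_of_nodup (PySem.Set.nodup_ofList _) (PySem.Set.nodup_ofList _)).mpr
      (by intro a; simp [PySem.Set.mem_ofList])
  have hcap' : ov ≤ pvCap d0 (PySem.Set.ofList order.reverse) := by
    rw [← pvCap_perm d0 hperm]
    exact hcap
  exact congrArg PySem.Dict.items
    (pvShrink_main order.reverse ov.toNat d0 ov hnn hnd (le_of_lt hpos) le_rfl hcap')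

-- ===== VERDICT (by name: the statement is the Claim_ definition above) =====

theorem normalize_count_distribution_py_spec : Claim_equal_normalize_count_distribution_py := by
  intro t counts prio _hdom hpre
  unfold Spec_normalize_count_distribution_py
  unfold normalize_count_distribution_py normalize_count_distribution_py_alt
  rw [pvClampB_eq]
  simp only []
  have hnn := pvClampA_nonneg counts
  have hnd := pvClampA_nodup counts
  by_cases hEq : (pvClampA counts).values.sum = t
  · rw [if_pos hEq, if_pos hEq]
  · rw [if_neg hEq, if_neg hEq]
    by_cases hlt : (pvClampA counts).values.sum < t
    · rw [if_pos hlt]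
      by_cases hord : (if prio = [] then (pvClampA counts).keys else prio) = []
      · rw [if_pos hord, if_pos hord]
      · rw [if_neg hord, if_neg hord, if_pos hlt]
        exact pv_main_increase (pvClampA counts) _ t _ hnd hord hlt
    · rw [if_neg hlt]
      by_cases hord : (if prio = [] then (pvClampA counts).keys else prio) = []
      · have hrev : (if prio = [] then (pvClampA counts).keys else prio).reverse = [] := by
          rw [hord]; rfl
        rw [if_pos hrev, if_pos hord]
      · have hrev : ¬ ((if prio = [] then (pvClampA counts).keys else prio).reverse = []) := by
          simpa [List.reverse_eq_nil_iff] using hord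
        rw [if_neg hrev, if_neg hord, if_neg hlt]
        have hpos : 0 < (pvClampA counts).values.sum - t := by omega
        have hcap : (pvClampA counts).values.sum - t ≤
            pvCap (pvClampA counts) (PySem.Set.ofList (if prio = [] then (pvClampA counts).keys else prio)) := by
          rcases hpre with h | h | h
          · have h' : (pvClampA counts).values.sum ≤ t := h
            omega
          · exact absurd h hord
          · exact h
        exact pv_main_shrink (pvClampA counts) _ _ hnn hnd hpos hcap
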